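-- pv_equiv track=rewrite | github.com/LEE010/Algorithm | programmers/DP/서울에서_경산까지.py | solution
-- ===== SOURCE A (Python) =====
-- def solution(K, travel):
--     N = len(travel)
--     cache = [0 for _ in range(K+1)]
--
--     for walk_time, walk_cost, bike_time, bike_cost in travel:
--         temp = [0 for _ in range(K+1)]
--
--         for time in range(K+1):
--             walk = cache[time-walk_time] + walk_cost if time >= walk_time and cache[time-walk_time] != -1 else -1
--             bike = cache[time-bike_time] + bike_cost if time >= bike_time and cache[time-bike_time] != -1 else -1
--             temp[time] = max(walk,bike)
--         cache = temp
--
--     return cache[-1]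
-- ===== SOURCE B (Python) =====
-- def solution(K, travel):
--     N = len(travel)
--     # pass 1 (top-down): needed[i] = budgets at which the best cost of the
--     # first i segments is required, starting from the single query (N, K)
--     needed = [set() for _ in range(N + 1)]
--     needed[N] = {K}
--     for i in range(N, 0, -1):
--         wt, _, bt, _ = travel[i - 1]
--         prev = needed[i - 1]
--         for t in needed[i]:
--             if t >= wt:
--                 prev.add(t - wt)
--             if t >= bt:
--                 prev.add(t - bt)
--     # pass 2 (bottom-up): evaluate only the needed budgets, as sparse dicts
--     val = {t: 0 for t in needed[0]}
--     for i in range(1, N + 1):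
--         wt, wc, bt, bc = travel[i - 1]
--         nval = {}
--         for t in needed[i]:
--             walk = -1
--             if t >= wt:
--                 s = val[t - wt]
--                 if s != -1:
--                     walk = s + wc
--             bike = -1
--             if t >= bt:
--                 s = val[t - bt]
--                 if s != -1:
--                     bike = s + bc
--             nval[t] = max(walk, bike)
--         val = nval
--     return val[K]
-- ===== Notes on version B (the rewrite author's own statement) =====
-- stated objective: alternative
-- what changed: Replaces A's bottom-up scan that fills all K+1 budget cells for every segment with a top-down two-pass DP: a downward pass computes, per level, the set of budgets actually reachable from the single query (N, K), and an upward pass evaluates the recurrence only at those budgets using sparse dicts.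
import Mathlib
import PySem

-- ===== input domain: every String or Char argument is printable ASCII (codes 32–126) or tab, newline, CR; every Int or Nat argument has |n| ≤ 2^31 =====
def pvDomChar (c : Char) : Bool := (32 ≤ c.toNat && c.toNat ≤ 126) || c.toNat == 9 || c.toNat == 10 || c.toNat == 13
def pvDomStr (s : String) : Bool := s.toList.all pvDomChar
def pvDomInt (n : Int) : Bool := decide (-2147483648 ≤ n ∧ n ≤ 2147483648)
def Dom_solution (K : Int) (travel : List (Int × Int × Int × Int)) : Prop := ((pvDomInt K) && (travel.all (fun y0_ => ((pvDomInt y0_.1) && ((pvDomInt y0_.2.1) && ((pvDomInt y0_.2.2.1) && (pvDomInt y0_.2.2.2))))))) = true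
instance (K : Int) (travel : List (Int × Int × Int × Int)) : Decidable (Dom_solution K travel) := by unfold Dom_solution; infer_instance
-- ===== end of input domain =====

-- B replaces A's bottom-up fill of all K+1 budget cells per segment by a top-down two-pass
-- DP that only visits the budgets reachable from the query (N, K) — alternative decomposition, same values.

-- ===== PORT A =====
-- one pass of A's outer loop: build temp[0..K] from the previous cache
def stepA (K : Int) (cache : List Int) (seg : Int × Int × Int × Int) : List Int :=
  (PySem.List.pyRange 0 (K+1) 1).map (fun time =>
    let walk := if seg.1 ≤ time ∧ PySem.List.pyGetD cache (time - seg.1) 0 ≠ -1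
                then PySem.List.pyGetD cache (time - seg.1) 0 + seg.2.1 else -1
    let bike := if seg.2.2.1 ≤ time ∧ PySem.List.pyGetD cache (time - seg.2.2.1) 0 ≠ -1
                then PySem.List.pyGetD cache (time - seg.2.2.1) 0 + seg.2.2.2 else -1
    max walk bike)

def solution (K : Int) (travel : List (Int × Int × Int × Int)) : Int :=
  let cache0 := (PySem.List.pyRange 0 (K+1) 1).map (fun _ => (0 : Int))
  let cache := travel.foldl (stepA K) cache0
  PySem.List.pyGetD cache (-1) 0

-- ===== PORT B =====

-- inner loop of pass 1: push the needed budgets of one level down one segment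
def downStep (seg : Int × Int × Int × Int) (S : PySem.Set Int) (prev : PySem.Set Int) : PySem.Set Int :=
  S.foldl (fun p t =>
    let p1 := if seg.1 ≤ t then PySem.Set.add p (t - seg.1) else p
    if seg.2.2.1 ≤ t then PySem.Set.add p1 (t - seg.2.2.1) else p1) prev

-- pass 1: the list needed[0], …, needed[N] (the loop runs i = N, …, 1, so foldr)
def neededB (travel : List (Int × Int × Int × Int)) (K : Int) : List (PySem.Set Int) :=
  travel.foldr (fun seg acc => downStep seg (acc.headD PySem.Set.empty) PySem.Set.empty :: acc)
    [PySem.Set.ofList [K]]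

-- inner loop of pass 2: values of one level from the previous level's dict
-- (val.getD is exact here: the looked-up key is always present, see pass2Val_getD)
def upStep (seg : Int × Int × Int × Int) (val : PySem.Dict Int Int) (S : PySem.Set Int) :
    PySem.Dict Int Int :=
  S.foldl (fun nval t =>
    let walk := if seg.1 ≤ t ∧ val.getD (t - seg.1) 0 ≠ -1
                then val.getD (t - seg.1) 0 + seg.2.1 else -1
    let bike := if seg.2.2.1 ≤ t ∧ val.getD (t - seg.2.2.1) 0 ≠ -1
                then val.getD (t - seg.2.2.1) 0 + seg.2.2.2 else -1
    nval.insert t (max walk bike)) PySem.Dict.empty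

def solution_alt (K : Int) (travel : List (Int × Int × Int × Int)) : Int :=
  match neededB travel K with
  | [] => 0  -- unreachable: neededB always has length N+1
  | S0 :: rest =>
    let val0 := S0.foldl (fun d t => d.insert t (0 : Int)) PySem.Dict.empty
    let val := (travel.zip rest).foldl (fun v p => upStep p.1 v p.2) val0
    val.getD K 0

-- ===== PRECONDITION & SPEC =====
-- Pre_ excludes exactly the inputs where A raises IndexError: a negative K
-- (cache is empty, so cache[-1] fails) or a negative walk/bike time (cache index > K).
def Pre_solution (K : Int) (travel : List (Int × Int × Int × Int)) : Prop :=
  0 ≤ K ∧ ∀ s ∈ travel, 0 ≤ s.1 ∧ 0 ≤ s.2.2.1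
instance (K : Int) (travel : List (Int × Int × Int × Int)) : Decidable (Pre_solution K travel) := by
  unfold Pre_solution; infer_instance

def pvWitness_solution : Int × (List (Int × Int × Int × Int)) := (3, [(1, 10, 2, 15), (2, 3, 1, 1)])

def Spec_solution (K : Int) (travel : List (Int × Int × Int × Int)) (out : Int) : Prop := out = solution_alt K travel
instance (K : Int) (travel : List (Int × Int × Int × Int)) (out : Int) : Decidable (Spec_solution K travel out) := by unfold Spec_solution; infer_instance

-- ===== CLAIM (what is proved, stated in full; the proofs are below) =====
def Claim_equal_solution : Prop := ∀ (K : Int) (travel : List (Int × Int × Int × Int)), Dom_solution K travel → Pre_solution K travel → Spec_solution K travel (solution K travel)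

-- ===== LEMMAS AND PROOFS =====

-- one segment's walk/bike choice on top of the value function for the rest
def stepOne (s : Int × Int × Int × Int) (f : Int → Int) (t : Int) : Int :=
  max (if s.1 ≤ t ∧ f (t - s.1) ≠ -1 then f (t - s.1) + s.2.1 else -1)
      (if s.2.2.1 ≤ t ∧ f (t - s.2.2.1) ≠ -1 then f (t - s.2.2.1) + s.2.2.2 else -1)

-- pure DP value: g l t = best cost for segments l (head chosen on top) within budget t
def g : List (Int × Int × Int × Int) → Int → Int
  | [], _ => 0
  | s :: l, t => stepOne s (g l) t

lemma stepA_map (K : Int) (f : Int → Int) (s : Int × Int × Int × Int)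
    (hw : 0 ≤ s.1) (hb : 0 ≤ s.2.2.1) :
    stepA K ((PySem.List.pyRange 0 (K+1) 1).map f) s
      = (PySem.List.pyRange 0 (K+1) 1).map (fun t => stepOne s f t) := by
  unfold stepA stepOne
  apply List.map_congr_left
  intro t ht
  rw [PySem.List.mem_pyRange_one] at ht
  by_cases h1 : s.1 ≤ t
  · rw [PySem.List.pyGetD_map_pyRange_of_nonneg f (K+1) (t - s.1) 0 (by omega) (by omega)]
    by_cases h2 : s.2.2.1 ≤ t
    · rw [PySem.List.pyGetD_map_pyRange_of_nonneg f (K+1) (t - s.2.2.1) 0 (by omega) (by omega)]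
    · simp [h2]
  · simp only [h1, false_and, if_false]
    by_cases h2 : s.2.2.1 ≤ t
    · rw [PySem.List.pyGetD_map_pyRange_of_nonneg f (K+1) (t - s.2.2.1) 0 (by omega) (by omega)]
    · simp [h2]

lemma foldA (K : Int) :
    ∀ (l : List (Int × Int × Int × Int)), (∀ s ∈ l, 0 ≤ s.1 ∧ 0 ≤ s.2.2.1) →
    l.foldl (stepA K) ((PySem.List.pyRange 0 (K+1) 1).map (fun _ => (0 : Int)))
      = (PySem.List.pyRange 0 (K+1) 1).map (fun t => g l.reverse t) := by
  intro l
  induction l using List.reverseRecOn with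
  | nil => intro _; simp [g]
  | append_singleton l s ih =>
    intro h
    rw [List.foldl_append, List.foldl_cons, List.foldl_nil,
        ih (fun x hx => h x (List.mem_append_left _ hx)),
        stepA_map K _ s (h s (by simp)).1 (h s (by simp)).2]
    simp only [List.reverse_append, List.reverse_singleton, List.singleton_append]
    rfl

lemma solution_eq_g (K : Int) (travel : List (Int × Int × Int × Int))
    (h : Pre_solution K travel) : solution K travel = g travel.reverse K := by
  obtain ⟨hK, hs⟩ := h
  rw [show solution K travel = PySem.List.pyGetD
        (travel.foldl (stepA K) ((PySem.List.pyRange 0 (K+1) 1).map (fun _ => (0:Int)))) (-1) 0 from rfl,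
      foldA K travel hs,
      PySem.List.pyRange_one_succ_right (by omega : (0:Int) ≤ K),
      List.map_append, List.map_singleton, PySem.List.pyGetD_neg_one_append_singleton]

def core : (Int × Int × Int × Int) → List (PySem.Set Int) → List (PySem.Set Int) :=
  fun seg acc => downStep seg (acc.headD PySem.Set.empty) PySem.Set.empty :: acc

def neededCore (l : List (Int × Int × Int × Int)) (S : PySem.Set Int) : List (PySem.Set Int) :=
  l.foldr core [S]

lemma neededB_eq (travel : List (Int × Int × Int × Int)) (K : Int) :
    neededB travel K = neededCore travel (PySem.Set.ofList [K]) := rfl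

lemma neededCore_length (l : List (Int × Int × Int × Int)) (S : PySem.Set Int) :
    (neededCore l S).length = l.length + 1 := by
  induction l with
  | nil => rfl
  | cons s l ih => simp only [neededCore, List.foldr_cons, core, List.length_cons] at *; omega

lemma neededCore_tail (l : List (Int × Int × Int × Int)) (S : PySem.Set Int)
    (tail : List (PySem.Set Int)) :
    l.foldr core (S :: tail) = neededCore l S ++ tail := by
  induction l with
  | nil => rfl
  | cons s l ih =>
    have hne : neededCore l S ≠ [] := by
      have := neededCore_length l S; intro h; rw [h] at this; simp at this
    obtain ⟨a, as, ha⟩ := List.exists_cons_of_ne_nil hne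
    show core s (List.foldr core (S :: tail) l) = core s (List.foldr core [S] l) ++ tail
    rw [show List.foldr core (S :: tail) l = l.foldr core (S :: tail) from rfl, ih]
    simp only [neededCore] at ha ⊢
    rw [ha]
    rfl

lemma neededCore_append (l : List (Int × Int × Int × Int)) (s : Int × Int × Int × Int)
    (S : PySem.Set Int) :
    neededCore (l ++ [s]) S = neededCore l (downStep s S PySem.Set.empty) ++ [S] := by
  simp only [neededCore, List.foldr_append, List.foldr_cons, List.foldr_nil]
  rw [show core s [S] = downStep s S PySem.Set.empty :: [S] from rfl]
  exact neededCore_tail l _ [S]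

lemma mem_downStep_mono (seg : Int × Int × Int × Int) :
    ∀ (S P : PySem.Set Int) (x : Int), x ∈ P → x ∈ downStep seg S P := by
  intro S
  induction S with
  | nil => intro P x hx; exact hx
  | cons u S ih =>
    intro P x hx
    simp only [downStep, List.foldl_cons] at *
    apply ih
    dsimp only
    split_ifs <;> simp [PySem.Set.mem_add, hx]

lemma mem_downStep_self (seg : Int × Int × Int × Int) :
    ∀ (S P : PySem.Set Int) (t : Int), t ∈ S →
      (seg.1 ≤ t → t - seg.1 ∈ downStep seg S P) ∧
      (seg.2.2.1 ≤ t → t - seg.2.2.1 ∈ downStep seg S P) := by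
  intro S
  induction S with
  | nil => intro P t ht; cases ht
  | cons u S ih =>
    intro P t ht
    rcases List.mem_cons.mp ht with h | h
    · subst h
      constructor
      · intro h1
        simp only [downStep, List.foldl_cons]
        apply mem_downStep_mono
        simp only [h1, if_true]
        split_ifs <;> simp [PySem.Set.mem_add]
      · intro h2
        simp only [downStep, List.foldl_cons]
        apply mem_downStep_mono
        simp only [h2, if_true]
        split_ifs <;> simp [PySem.Set.mem_add]
    · constructor
      · intro h1
        simp only [downStep, List.foldl_cons]
        exact ((ih _ t h).1 h1)
      · intro h2
        simp only [downStep, List.foldl_cons]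
        exact ((ih _ t h).2 h2)

lemma getD_fold_insert_skip (F : Int → Int) :
    ∀ (S : List Int) (d0 : PySem.Dict Int Int) (t : Int), t ∉ S →
      (S.foldl (fun d u => d.insert u (F u)) d0).getD t 0 = d0.getD t 0 := by
  intro S
  induction S with
  | nil => intro d0 t _; rfl
  | cons u S ih =>
    intro d0 t ht
    simp only [List.foldl_cons]
    rw [ih _ t (fun h => ht (List.mem_cons_of_mem _ h)),
        PySem.Dict.getD_insert_of_ne _ _ _ (fun (h : t = u) => ht (by rw [h]; exact List.mem_cons_self))]

lemma getD_fold_insert (F : Int → Int) :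
    ∀ (S : List Int) (d0 : PySem.Dict Int Int) (t : Int), t ∈ S →
      (S.foldl (fun d u => d.insert u (F u)) d0).getD t 0 = F t := by
  intro S
  induction S with
  | nil => intro d0 t ht; cases ht
  | cons u S ih =>
    intro d0 t ht
    simp only [List.foldl_cons]
    by_cases h : t ∈ S
    · exact ih _ t h
    · rcases List.mem_cons.mp ht with h' | h'
      · subst h'
        rw [getD_fold_insert_skip F S _ t h, PySem.Dict.getD_insert_self]
      · exact absurd h' h

def pass2Val (l : List (Int × Int × Int × Int)) (S : PySem.Set Int) : PySem.Dict Int Int :=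
  match neededCore l S with
  | [] => PySem.Dict.empty
  | S0 :: rest =>
    (l.zip rest).foldl (fun v p => upStep p.1 v p.2)
      (S0.foldl (fun d t => d.insert t (0 : Int)) PySem.Dict.empty)

lemma pass2Val_getD (l : List (Int × Int × Int × Int)) :
    ∀ (S : PySem.Set Int) (t : Int), t ∈ S → (pass2Val l S).getD t 0 = g l.reverse t := by
  induction l using List.reverseRecOn with
  | nil =>
    intro S t ht
    simp only [pass2Val, neededCore, List.foldr_nil, List.zip_nil_right, List.foldl_nil,
      List.reverse_nil]
    rw [getD_fold_insert (fun _ => 0) S _ t ht]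
    rfl
  | append_singleton l s ih =>
    intro S t ht
    have hlen := neededCore_length l (downStep s S PySem.Set.empty)
    obtain ⟨S0, rest', hS0⟩ :
        ∃ a as, neededCore l (downStep s S PySem.Set.empty) = a :: as := by
      cases h : neededCore l (downStep s S PySem.Set.empty) with
      | nil => rw [h] at hlen; simp at hlen
      | cons a as => exact ⟨a, as, rfl⟩
    have hrest : rest'.length = l.length := by
      rw [hS0] at hlen; simp at hlen; omega
    have hz : (l ++ [s]).zip (rest' ++ [S]) = l.zip rest' ++ [(s, S)] := by
      rw [List.zip_append hrest.symm]; rfl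
    have hval : pass2Val (l ++ [s]) S = upStep s (pass2Val l (downStep s S PySem.Set.empty)) S := by
      simp only [pass2Val, neededCore_append, hS0, List.cons_append, hz, List.foldl_append,
        List.foldl_cons, List.foldl_nil]
    rw [hval]
    have hup : ∀ t' ∈ S, (upStep s (pass2Val l (downStep s S PySem.Set.empty)) S).getD t' 0
        = (let walk := if s.1 ≤ t' ∧ (pass2Val l (downStep s S PySem.Set.empty)).getD (t' - s.1) 0 ≠ -1
                      then (pass2Val l (downStep s S PySem.Set.empty)).getD (t' - s.1) 0 + s.2.1 else -1
           let bike := if s.2.2.1 ≤ t' ∧ (pass2Val l (downStep s S PySem.Set.empty)).getD (t' - s.2.2.1) 0 ≠ -1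
                      then (pass2Val l (downStep s S PySem.Set.empty)).getD (t' - s.2.2.1) 0 + s.2.2.2 else -1
           max walk bike) := by
      intro t' ht'
      exact getD_fold_insert _ S _ t' ht'
    rw [hup t ht]
    simp only [List.reverse_append, List.reverse_singleton, List.singleton_append]
    rw [show g (s :: l.reverse) t = stepOne s (g l.reverse) t from rfl]
    unfold stepOne
    by_cases h1 : s.1 ≤ t
    · rw [ih _ _ ((mem_downStep_self s S PySem.Set.empty t ht).1 h1)]
      by_cases h2 : s.2.2.1 ≤ t
      · rw [ih _ _ ((mem_downStep_self s S PySem.Set.empty t ht).2 h2)]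
      · simp [h2]
    · simp only [h1, false_and, if_false]
      by_cases h2 : s.2.2.1 ≤ t
      · rw [ih _ _ ((mem_downStep_self s S PySem.Set.empty t ht).2 h2)]
      · simp [h2]

lemma solution_alt_eq_g (K : Int) (travel : List (Int × Int × Int × Int)) :
    solution_alt K travel = g travel.reverse K := by
  have h : solution_alt K travel = (pass2Val travel (PySem.Set.ofList [K])).getD K 0 := by
    simp only [solution_alt, neededB_eq, pass2Val]
    cases neededCore travel (PySem.Set.ofList [K]) with
    | nil => rfl
    | cons S0 rest => rfl
  rw [h, pass2Val_getD travel _ K (by simp [PySem.Set.mem_ofList])]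

-- ===== VERDICT (by name: the statement is the Claim_ definition above) =====
theorem solution_spec : Claim_equal_solution := by
  intro K travel _ hpre
  unfold Spec_solution
  rw [solution_eq_g K travel hpre, solution_alt_eq_g]
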